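-- pv_equiv track=rewrite | github.com/ATPs/xiaolongTools | WenlinTools.Python3/scripts/barcode_scripts/step2_parse_sams.py | collapse_same_alignment
-- ===== SOURCE A (Python) =====
-- def collapse_same_alignment(aln_dict):
--     hashDict = {}
--     for name in aln_dict:
--         seq = aln_dict[name]
--         try:
--             hashDict[seq].append(name)
--         except KeyError:
--             hashDict[seq] = [name]
--
--     new = {}
--     for seq in hashDict:
--         names = hashDict[seq]
--         if len(names) == 1:
--             new[names[0]] = seq
--         else:
--             newName = '[%sr]%s' % (len(names), '|'.join(names))
--             new[newName] = seq
--     return new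
-- ===== SOURCE B (Python) =====
-- def collapse_same_alignment(aln_dict):
--     items = list(aln_dict.items())
--     new = {}
--     for i, (name, seq) in enumerate(items):
--         if any(s == seq for _, s in items[:i]):
--             continue  # this sequence was already emitted at its first occurrence
--         names = [n for n, s in items if s == seq]
--         if len(names) == 1:
--             new[names[0]] = seq
--         else:
--             new['[%sr]%s' % (len(names), '|'.join(names))] = seq
--     return new
-- ===== Notes on version B (the rewrite author's own statement) =====
-- stated objective: alternative
-- what changed: Replaces the seq-keyed hash-map grouping pass (defaulting dict of name lists, then a second loop over that dict) with a direct nested scan: at each first occurrence of a sequence the names are collected by filtering the full item list, so no grouping dictionary is built.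
import Mathlib
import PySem

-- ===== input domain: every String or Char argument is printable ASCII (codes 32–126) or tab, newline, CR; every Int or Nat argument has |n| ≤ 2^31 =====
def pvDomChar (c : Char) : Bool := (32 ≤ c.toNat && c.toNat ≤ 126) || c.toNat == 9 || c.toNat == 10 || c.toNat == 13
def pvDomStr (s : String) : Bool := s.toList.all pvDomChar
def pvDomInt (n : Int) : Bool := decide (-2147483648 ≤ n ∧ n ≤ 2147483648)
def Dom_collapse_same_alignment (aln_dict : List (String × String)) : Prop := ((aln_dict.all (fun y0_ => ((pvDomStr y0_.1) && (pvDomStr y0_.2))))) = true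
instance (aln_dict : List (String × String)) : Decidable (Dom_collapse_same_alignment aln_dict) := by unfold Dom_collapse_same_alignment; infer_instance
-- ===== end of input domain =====

-- B replaces A's hash-map grouping with a first-occurrence nested scan (alternative decomposition, no speed claim).

-- ===== PORT A =====
-- 'for name in aln_dict: seq = aln_dict[name]' iterates the dict's (name, seq) items in insertion order.
def collapse_same_alignment (aln_dict : List (String × String)) : List (String × String) :=
  let hashDict : PySem.Dict String (List String) :=
    aln_dict.foldl (fun hashDict p => hashDict.modify p.2 [] (fun names => names ++ [p.1]))
      PySem.Dict.empty
  let new : PySem.Dict String String :=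
    hashDict.items.foldl (fun new q =>
      let seq := q.1
      let names := q.2
      if names.length == 1 then
        new.insert (names.headD "") seq    -- names[0]; names is nonempty whenever stored
      else
        new.insert ("[" ++ PySem.Int.toStr (names.length : Int) ++ "r]" ++ PySem.Str.join "|" names) seq)
      PySem.Dict.empty
  new.items

-- ===== PORT B =====
def collapse_same_alignment_alt (aln_dict : List (String × String)) : List (String × String) :=
  let items := aln_dict
  let new : PySem.Dict String String :=
    (PySem.List.enumerate items 0).foldl (fun new ip =>
      let seq := ip.2.2
      if (PySem.List.slice items none (some ip.1)).any (fun q => q.2 == seq) then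
        new
      else
        let names := (items.filter (fun q => q.2 == seq)).map (fun q => q.1)
        if names.length == 1 then
          new.insert (names.headD "") seq    -- names[0]; names contains at least ip's own name
        else
          new.insert ("[" ++ PySem.Int.toStr (names.length : Int) ++ "r]" ++ PySem.Str.join "|" names) seq)
      PySem.Dict.empty
  new.items

-- ===== PRECONDITION & SPEC =====
def Spec_collapse_same_alignment (aln_dict : List (String × String)) (out : List (String × String)) : Prop := out = collapse_same_alignment_alt aln_dict
instance (aln_dict : List (String × String)) (out : List (String × String)) : Decidable (Spec_collapse_same_alignment aln_dict out) := by unfold Spec_collapse_same_alignment; infer_instance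

-- ===== CLAIM (what is proved, stated in full; the proofs are below) =====
def Claim_equal_collapse_same_alignment : Prop := ∀ (aln_dict : List (String × String)), Dom_collapse_same_alignment aln_dict → Spec_collapse_same_alignment aln_dict (collapse_same_alignment aln_dict)

-- ===== LEMMAS AND PROOFS =====

-- emitting step shared by the two characterizations: insert the entry for sequence s of list l
def pvEmit (l : List (String × String)) (new : PySem.Dict String String) (s : String) : PySem.Dict String String :=
  if ((l.filter (fun q => q.2 == s)).map (fun q => q.1)).length == 1 then
    new.insert (((l.filter (fun q => q.2 == s)).map (fun q => q.1)).headD "") s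
  else
    new.insert ("[" ++ PySem.Int.toStr (((l.filter (fun q => q.2 == s)).map (fun q => q.1)).length : Int) ++ "r]"
      ++ PySem.Str.join "|" ((l.filter (fun q => q.2 == s)).map (fun q => q.1))) s

-- the sequences of xs that are new relative to seen, in first-occurrence order
def pvNews (seen : List String) : List String → List String
  | [] => []
  | x :: xs => if x ∈ seen then pvNews (seen ++ [x]) xs else x :: pvNews (seen ++ [x]) xs

theorem pvNews_congr (s₁ s₂ : List String) (xs : List String)
    (h : ∀ a, a ∈ s₁ ↔ a ∈ s₂) : pvNews s₁ xs = pvNews s₂ xs := by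
  induction xs generalizing s₁ s₂ with
  | nil => rfl
  | cons x xs ih =>
      have h' : ∀ a, a ∈ s₁ ++ [x] ↔ a ∈ s₂ ++ [x] := by
        intro a; simp [h a]
      simp only [pvNews]
      rw [ih _ _ h']
      by_cases hx : x ∈ s₁
      · rw [if_pos hx, if_pos ((h x).mp hx)]
      · rw [if_neg hx, if_neg (fun hh => hx ((h x).mpr hh))]

theorem update_eq_append_pvNews (xs seen : List String) :
    PySem.Set.update seen xs = seen ++ pvNews seen xs := by
  induction xs generalizing seen with
  | nil => simp [PySem.Set.update_nil, pvNews]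
  | cons x xs ih =>
      rw [PySem.Set.update_cons, pvNews]
      by_cases hx : x ∈ seen
      · rw [if_pos hx, PySem.Set.add_of_mem hx, ih]
        have : pvNews seen xs = pvNews (seen ++ [x]) xs :=
          pvNews_congr _ _ _ (by intro a; simp; intro ha; subst ha; exact hx)
        rw [this]
      · rw [if_neg hx, PySem.Set.add_of_not_mem hx, ih, List.append_assoc]
        rfl

-- A's grouping fold: value of any key
theorem getD_groupfold (l : List (String × String)) (d : PySem.Dict String (List String)) (c : String) :
    (l.foldl (fun h p => h.modify p.2 [] (fun names => names ++ [p.1])) d).getD c []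
      = d.getD c [] ++ (l.filter (fun q => q.2 == c)).map (fun q => q.1) := by
  induction l generalizing d with
  | nil => simp
  | cons p l ih =>
      simp only [List.foldl_cons, ih, List.filter_cons]
      by_cases hp : p.2 = c
      · simp [hp]
      · simp [PySem.Dict.getD_modify, hp, Ne.symm hp]

-- B's loop: processing the tail t of p ++ t emits exactly the new sequences of t
theorem altLoop_eq (l : List (String × String)) :
    ∀ (t p : List (String × String)) (d : PySem.Dict String String), p ++ t = l →
    (PySem.List.enumerate t (p.length : Int)).foldl (fun new ip =>
      if (PySem.List.slice l none (some ip.1)).any (fun q => q.2 == ip.2.2) then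
        new
      else
        if ((l.filter (fun q => q.2 == ip.2.2)).map (fun q => q.1)).length == 1 then
          new.insert (((l.filter (fun q => q.2 == ip.2.2)).map (fun q => q.1)).headD "") ip.2.2
        else
          new.insert ("[" ++ PySem.Int.toStr (((l.filter (fun q => q.2 == ip.2.2)).map (fun q => q.1)).length : Int) ++ "r]"
            ++ PySem.Str.join "|" ((l.filter (fun q => q.2 == ip.2.2)).map (fun q => q.1))) ip.2.2) d
      = (pvNews (p.map (fun q => q.2)) (t.map (fun q => q.2))).foldl (pvEmit l) d := by
  intro t
  induction t with
  | nil => intro p d _; simp [pvNews]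
  | cons x t ih =>
      intro p d hl
      have hpx : (p ++ [x]) ++ t = l := by rw [List.append_assoc]; exact hl
      have hlen : (p.length : Int) + 1 = (((p ++ [x]).length : Nat) : Int) := by simp
      have hslice : PySem.List.slice l none (some (p.length : Int)) = p := by
        rw [PySem.List.slice_to_natCast, ← hl, List.take_left]
      rw [PySem.List.enumerate_cons, List.foldl_cons, hlen, ih (p ++ [x]) _ hpx]
      by_cases hx : x.2 ∈ p.map (fun q => q.2)
      · have hc : (PySem.List.slice l none (some (p.length : Int))).any (fun q => q.2 == x.2) = true := by
          rw [hslice]; simp only [List.any_eq_true]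
          rcases List.mem_map.mp hx with ⟨q, hq, hq2⟩
          exact ⟨q, hq, by simp [hq2]⟩
        rw [hc]
        simp [pvNews, hx, List.map_append]
      · have hc : (PySem.List.slice l none (some (p.length : Int))).any (fun q => q.2 == x.2) = false := by
          rw [hslice]
          rw [List.any_eq_false]
          intro q hq h
          exact hx (List.mem_map.mpr ⟨q, hq, by simpa using h⟩)
        rw [hc]
        simp [pvNews, hx, List.map_append, pvEmit]

-- ===== VERDICT (by name: the statement is the Claim_ definition above) =====
theorem collapse_same_alignment_spec : Claim_equal_collapse_same_alignment := by
  intro l _hdom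
  unfold Spec_collapse_same_alignment collapse_same_alignment collapse_same_alignment_alt
  simp only []
  -- B side: the enumerate loop emits the new sequences in first-occurrence order
  have hB := altLoop_eq l l [] PySem.Dict.empty (by simp)
  simp only [List.length_nil, Nat.cast_zero, List.map_nil] at hB
  rw [hB]
  -- A side
  set hashDict := l.foldl (fun h p => h.modify p.2 [] (fun names => names ++ [p.1])) PySem.Dict.empty with hh
  have hnd : hashDict.keys.Nodup := by
    rw [hh]
    exact PySem.Dict.nodup_keys_foldl_modify_key l (fun p => p.2) [] (fun h p names => names ++ [p.1]) PySem.Dict.empty (by simp)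
  have hkeys : hashDict.keys = pvNews [] (l.map (fun q => q.2)) := by
    rw [hh, PySem.Dict.keys_foldl_modify_key]
    simp only [PySem.Dict.keys_empty]
    rw [update_eq_append_pvNews]
    simp
  have hitems : hashDict.items = hashDict.keys.map (fun k => (k, hashDict.getD k [])) :=
    PySem.Dict.items_eq_map_keys hashDict hnd []
  rw [hitems, List.foldl_map, hkeys]
  congr 1
  apply PySem.List.foldl_congr_mem
  intro new s _hs
  have hg : hashDict.getD s [] = (l.filter (fun q => q.2 == s)).map (fun q => q.1) := by
    rw [hh, getD_groupfold]; simp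
  simp only [hg, pvEmit]
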